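-- pv_equiv track=rewrite | github.com/BenderRobot/bendervoice | make_find_supp.py | make_find
-- ===== SOURCE A (Python) =====
-- def make_find(ordre):
-- 	i = 0
-- 	space_count = 0
-- 	while i < len(ordre):
-- 		if ordre[i] == " ":
-- 			space_count = space_count + 1
-- 			i = i + 1
-- 		else:
-- 			i = i + 1
-- 	length = space_count + len(ordre)
-- 	new_ordre = [" "]*length
-- 	i = 0
-- 	j = 0
-- 	while i < len(ordre):
-- 		if ordre[i] == " ":
-- 			new_ordre[j] = "\\"
-- 			j = j + 1
-- 			new_ordre[j] = ordre[i]
-- 			i = i + 1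
-- 			j = j + 1
-- 		else:
-- 			new_ordre[j] = ordre[i]
-- 			i = i + 1
-- 			j = j + 1
-- 	#print new_ordre
-- 	return "".join(new_ordre)
-- ===== SOURCE B (Python) =====
-- def make_find(ordre):
-- 	return "\\ ".join(ordre.split(" "))
-- ===== Notes on version B (the rewrite author's own statement) =====
-- stated objective: faster
-- what changed: Replaced A's character-level count-then-preallocate-then-index-fill scheme with a split/join decomposition: split the string on spaces and join the pieces with the escape sequence, with no per-character Python-level loop.
import Mathlib
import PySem

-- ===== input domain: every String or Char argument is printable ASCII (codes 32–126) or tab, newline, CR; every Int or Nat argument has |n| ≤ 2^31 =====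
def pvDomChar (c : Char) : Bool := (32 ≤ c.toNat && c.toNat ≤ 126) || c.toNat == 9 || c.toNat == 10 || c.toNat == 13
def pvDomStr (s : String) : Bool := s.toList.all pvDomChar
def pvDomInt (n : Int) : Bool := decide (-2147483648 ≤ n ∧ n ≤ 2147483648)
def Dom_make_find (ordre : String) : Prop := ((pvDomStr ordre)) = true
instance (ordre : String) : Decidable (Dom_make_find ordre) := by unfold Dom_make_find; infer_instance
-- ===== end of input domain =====

-- B: split the string on spaces and join the pieces with the escape sequence — a split/join
-- decomposition with no per-character Python-level loop (objective: faster, constant factor, measured).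

-- ===== PORT A =====
-- first while loop: count the spaces
def pvCountLoop (cs : List Char) : Nat :=
  match cs with
  | [] => 0
  | c :: rest => if c = ' ' then 1 + pvCountLoop rest else pvCountLoop rest

-- second while loop: write chars (with '\' before each space) into the preallocated buffer at j
def pvFillLoop (cs : List Char) (j : Nat) (buf : List Char) : List Char :=
  match cs with
  | [] => buf
  | c :: rest =>
    if c = ' ' then pvFillLoop rest (j + 2) ((buf.set j '\\').set (j + 1) c)
    else pvFillLoop rest (j + 1) (buf.set j c)

def make_find (ordre : String) : String :=
  let cs := ordre.toList
  let space_count := pvCountLoop cs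
  let length := space_count + cs.length
  let new_ordre := List.replicate length ' '
  String.mk (pvFillLoop cs 0 new_ordre)

-- ===== PORT B =====
-- ordre.split(" ") with the literal non-empty separator " " is PySem.Chars.splitOn; "\ ".join is PySem.Str.join
def make_find_alt (ordre : String) : String :=
  PySem.Str.join "\\ " ((PySem.Chars.splitOn ordre.toList " ".toList).map String.mk)

-- ===== PRECONDITION & SPEC =====
def Spec_make_find (ordre : String) (out : String) : Prop := out = make_find_alt ordre
instance (ordre : String) (out : String) : Decidable (Spec_make_find ordre out) := by unfold Spec_make_find; infer_instance

-- ===== CLAIM =====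
def Claim_equal_make_find : Prop := ∀ (ordre : String), Dom_make_find ordre → Spec_make_find ordre (make_find ordre)

-- ===== LEMMAS AND PROOFS =====

-- the escaped form of one character
def pvEnc (c : Char) : List Char := if c = ' ' then ['\\', ' '] else [c]

-- reference split on a single space, structural recursion
def pvSp : List Char → List (List Char)
  | [] => [[]]
  | c :: rest =>
    if c = ' ' then [] :: pvSp rest
    else
      match pvSp rest with
      | [] => [[c]]          -- unreachable: pvSp is never empty
      | h :: t => (c :: h) :: t

theorem pvSp_ne_nil (cs : List Char) : pvSp cs ≠ [] := by
  cases cs with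
  | nil => simp [pvSp]
  | cons c rest =>
    simp only [pvSp]
    split_ifs
    · simp
    · cases h : pvSp rest <;> simp

-- prepend to the head piece
def pvConsHead (pre : List Char) : List (List Char) → List (List Char)
  | [] => [pre]
  | h :: t => (pre ++ h) :: t

theorem pvTakeSetSucc {α : Type} : ∀ (buf : List α) (j : Nat) (c : α), j < buf.length →
    (buf.set j c).take (j + 1) = buf.take j ++ [c] := by
  intro buf
  induction buf with
  | nil => intro j c h; simp at h
  | cons b bs ih =>
    intro j c h
    cases j with
    | zero => simp
    | succ j =>
      simp only [List.set_cons_succ, List.take_succ_cons]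
      rw [ih j c (by simpa using h)]
      simp

theorem pvFillLoop_eq (cs : List Char) : ∀ (j : Nat) (buf : List Char),
    buf.length = j + pvCountLoop cs + cs.length →
    pvFillLoop cs j buf = buf.take j ++ cs.flatMap pvEnc := by
  induction cs with
  | nil =>
    intro j buf h
    simp [pvCountLoop] at h
    simp [pvFillLoop, List.take_of_length_le (Nat.le_of_eq h)]
  | cons c rest ih =>
    intro j buf h
    by_cases hc : c = ' '
    · have hcount : pvCountLoop (c :: rest) = 1 + pvCountLoop rest := by simp [pvCountLoop, hc]
      rw [hcount, List.length_cons] at h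
      have hj : j < buf.length := by omega
      have hj1 : j + 1 < (buf.set j '\\').length := by simp only [List.length_set]; omega
      have hlen : ((buf.set j '\\').set (j+1) c).length = (j+2) + pvCountLoop rest + rest.length := by
        simp only [List.length_set]; omega
      rw [pvFillLoop, if_pos hc, ih _ _ hlen]
      have htake : ((buf.set j '\\').set (j+1) c).take (j+2) = buf.take j ++ ['\\', c] := by
        rw [pvTakeSetSucc _ (j+1) c hj1, pvTakeSetSucc _ j '\\' hj]
        simp
      rw [htake]
      simp [pvEnc, hc]
    · have hcount : pvCountLoop (c :: rest) = pvCountLoop rest := by simp [pvCountLoop, hc]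
      rw [hcount, List.length_cons] at h
      have hj : j < buf.length := by omega
      have hlen : (buf.set j c).length = (j+1) + pvCountLoop rest + rest.length := by
        simp only [List.length_set]; omega
      rw [pvFillLoop, if_neg hc, ih _ _ hlen]
      rw [pvTakeSetSucc _ j c hj]
      simp [pvEnc, hc]

-- characterisation of PySem's splitOn.go with separator [' ']
theorem pvGo_eq : ∀ (l : List Char) (fuel : Nat) (cur : List Char) (acc : List (List Char)),
    l.length + 1 ≤ fuel →
    PySem.Chars.splitOn.go [' '] fuel l cur acc = acc.reverse ++ pvConsHead cur.reverse (pvSp l) := by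
  intro l
  induction l with
  | nil =>
    intro fuel cur acc h
    cases fuel with
    | zero => omega
    | succ f => simp [PySem.Chars.splitOn.go, pvSp, pvConsHead]
  | cons c rest ih =>
    intro fuel cur acc h
    cases fuel with
    | zero => simp at h
    | succ f =>
      by_cases hc : c = ' '
      · have hpre : List.isPrefixOf [' '] (c :: rest) = true := by simp [List.isPrefixOf, hc]
        rw [PySem.Chars.splitOn.go, if_pos hpre]
        have hd : List.drop ([' '] : List Char).length (c :: rest) = rest := by simp
        simp only [List.length_cons] at h
        rw [hd, ih f [] (cur.reverse :: acc) (by omega)]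
        cases hsp : pvSp rest with
        | nil => exact absurd hsp (pvSp_ne_nil rest)
        | cons hh tt => simp [pvSp, hc, pvConsHead, hsp]
      · have hpre : List.isPrefixOf [' '] (c :: rest) = false := by
          simp only [List.isPrefixOf, Bool.and_eq_false_iff, beq_eq_false_iff_ne]
          exact Or.inl fun h' => hc h'.symm
        rw [PySem.Chars.splitOn.go, if_neg (by simp [List.isPrefixOf]; exact fun h' => hc h'.symm)]
        simp only [List.length_cons] at h
        rw [ih f (c :: cur) acc (by omega)]
        cases hsp : pvSp rest with
        | nil => exact absurd hsp (pvSp_ne_nil rest)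
        | cons hh tt => simp [pvSp, hc, hsp, pvConsHead]

theorem pvSplitOn_eq (cs : List Char) : PySem.Chars.splitOn cs [' '] = pvSp cs := by
  rw [PySem.Chars.splitOn, pvGo_eq cs (cs.length + 1) [] [] (by omega)]
  cases h : pvSp cs with
  | nil => exact absurd h (pvSp_ne_nil cs)
  | cons hh tt => simp [pvConsHead]

theorem pvJoin_sp (cs : List Char) :
    List.intercalate ['\\', ' '] (pvSp cs) = cs.flatMap pvEnc := by
  induction cs with
  | nil => simp [pvSp, List.intercalate]
  | cons c rest ih =>
    by_cases hc : c = ' '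
    · cases hsp : pvSp rest with
      | nil => exact absurd hsp (pvSp_ne_nil rest)
      | cons hh tt =>
        rw [hsp] at ih
        simp only [pvSp, if_pos hc]
        rw [hsp] at *
        simp only [List.intercalate, List.intersperse, List.flatten] at *
        simp [hc, pvEnc, ih]
    · cases hsp : pvSp rest with
      | nil => exact absurd hsp (pvSp_ne_nil rest)
      | cons hh tt =>
        rw [hsp] at ih
        simp only [pvSp, if_neg hc, hsp]
        cases tt with
        | nil =>
          simp only [List.intercalate, List.intersperse, List.flatten] at *
          simp only [pvEnc, if_neg hc, List.flatMap_cons, List.singleton_append]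
          simp at ih
          simp [ih]
        | cons t2 ts =>
          simp only [List.intercalate, List.intersperse, List.flatten] at *
          simp [pvEnc, hc] at *
          simp [ih]

-- ===== VERDICT =====
theorem make_find_spec : Claim_equal_make_find := by
  intro ordre _
  show String.mk (pvFillLoop ordre.toList 0
      (List.replicate (pvCountLoop ordre.toList + ordre.toList.length) ' ')) = make_find_alt ordre
  rw [pvFillLoop_eq _ 0 _ (by simp [Nat.add_comm])]
  simp only [List.take_zero, List.nil_append]
  unfold make_find_alt PySem.Str.join
  rw [show (" ").toList = [' '] from rfl, pvSplitOn_eq]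
  congr 1
  have : (List.map String.mk (pvSp ordre.toList)).map String.toList = pvSp ordre.toList := by
    simp only [List.map_map, Function.comp_def,
      show ∀ x : List Char, (String.mk x).toList = x from
        fun _ => Eq.symm (String.ofList_eq.mp rfl), List.map_id']
  simp only [PySem.Chars.join]
  rw [show ("\\ ").toList = ['\\', ' '] from rfl]
  rw [← pvJoin_sp]
  congr 1
  exact this.symm
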